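-- pv_equiv track=rewrite | github.com/6puritans9/Algorithms | Boj/Gold/data_structure/frequency_map_w_prefix_sum/2143.py | get_prefix_sum
-- ===== SOURCE A (Python) =====
-- from collections import defaultdict
--
-- def get_prefix_sum(length: int, array: list[int]) -> dict[int, int]:
--     # TC = O(N^2) + O(M^2) == O(N^2)
--     # SC = O(N)
--
--     prefix_sum = defaultdict(int)
--
--     for i in range(length):
--         current_sum = 0
--
--         for j in range(i, length):
--             current_sum += array[j]
--             prefix_sum[current_sum] += 1
--
--     return prefix_sum
-- ===== SOURCE B (Python) =====
-- from collections import defaultdict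
--
-- def get_prefix_sum(length: int, array: list[int]) -> dict[int, int]:
--     # Back-to-front: sums starting at i are array[i] followed by array[i] added
--     # to each sum starting at i+1 (a map over the previous row, no running sum).
--     rows = []
--     row = []
--     for i in reversed(range(length)):
--         x = array[i]
--         row = [x] + [x + s for s in row]
--         rows.append(row)
--
--     out = defaultdict(int)
--     for row in reversed(rows):
--         for s in row:
--             out[s] += 1
--     return out
-- ===== Notes on version B (the rewrite author's own statement) =====
-- stated objective: alternative
-- what changed: B never forms a subarray sum from scratch: it derives each row of sums (those starting at index i) from the next row by mapping +array[i] over it, building the rows back-to-front, then counts them in one forward pass; A instead runs a nested index loop with an incremental running-sum accumulator.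
import Mathlib
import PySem

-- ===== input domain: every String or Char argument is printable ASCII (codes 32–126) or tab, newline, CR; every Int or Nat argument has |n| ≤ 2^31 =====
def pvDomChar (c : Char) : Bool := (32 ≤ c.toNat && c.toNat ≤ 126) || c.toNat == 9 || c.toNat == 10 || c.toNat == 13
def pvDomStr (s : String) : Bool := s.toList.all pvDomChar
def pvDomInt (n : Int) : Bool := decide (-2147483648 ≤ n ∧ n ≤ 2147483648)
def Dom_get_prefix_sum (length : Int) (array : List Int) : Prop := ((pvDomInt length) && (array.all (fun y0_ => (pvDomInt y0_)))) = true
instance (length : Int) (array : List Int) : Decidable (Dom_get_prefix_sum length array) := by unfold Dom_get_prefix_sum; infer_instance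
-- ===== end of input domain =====

-- B builds each row of subarray sums back-to-front from the next row by a map (+array[i]),
-- then counts the rows in one forward pass (alternative decomposition, same cost).


-- ===== PORT A =====
def get_prefix_sum (length : Int) (array : List Int) : List (Int × Int) :=
  let prefix_sum : PySem.Dict Int Int :=
    (PySem.List.pyRange 0 length 1).foldl
      (fun d i =>
        ((PySem.List.pyRange i length 1).foldl
          (fun (p : Int × PySem.Dict Int Int) j =>
            let cs := p.1 + PySem.List.pyGetD array j 0   -- array[j]; in range under Pre_
            (cs, p.2.modify cs 0 (· + 1)))                 -- prefix_sum[cs] += 1 (defaultdict)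
          (0, d)).2)
      PySem.Dict.empty
  prefix_sum.items

-- ===== PORT B =====
def get_prefix_sum_alt (length : Int) (array : List Int) : List (Int × Int) :=
  let st :=                                                -- the (rows, row) state of Source B's first loop
    (PySem.List.pyRange 0 length 1).reverse.foldl          -- reversed(range(length))
      (fun (p : List (List Int) × List Int) i =>
        let x := PySem.List.pyGetD array i 0               -- array[i]; in range under Pre_
        let row := x :: p.2.map (fun s => x + s)           -- [x] + [x + s for s in row]
        (p.1 ++ [row], row))                               -- rows.append(row)
      ([], [])
  let out : PySem.Dict Int Int :=
    st.1.reverse.foldl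
      (fun d row => row.foldl (fun d s => d.modify s 0 (· + 1)) d)
      PySem.Dict.empty
  out.items

-- ===== PRECONDITION & SPEC =====
-- Pre_ excludes exactly length > len(array), where the Python A raises IndexError (array[j]).
def Pre_get_prefix_sum (length : Int) (array : List Int) : Prop := length ≤ (array.length : Int)
instance (length : Int) (array : List Int) : Decidable (Pre_get_prefix_sum length array) := by unfold Pre_get_prefix_sum; infer_instance
def pvWitness_get_prefix_sum : Int × List Int := (3, [1, -2, 2])

def Spec_get_prefix_sum (length : Int) (array : List Int) (out : List (Int × Int)) : Prop := out = get_prefix_sum_alt length array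
instance (length : Int) (array : List Int) (out : List (Int × Int)) : Decidable (Spec_get_prefix_sum length array out) := by unfold Spec_get_prefix_sum; infer_instance

-- ===== CLAIM (what is proved, stated in full; the proofs are below) =====
def Claim_equal_get_prefix_sum : Prop := ∀ (length : Int) (array : List Int), Dom_get_prefix_sum length array → Pre_get_prefix_sum length array → Spec_get_prefix_sum length array (get_prefix_sum length array)

-- ===== LEMMAS AND PROOFS =====

-- cumulative-sum key list of A's inner loop (c = running sum so far)
def pvCum (f : Int → Int) (c : Int) : List Int → List Int
  | [] => []
  | j :: js => (c + f j) :: pvCum f (c + f j) js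

-- the row of subarray sums starting at index i
def pvRow (array : List Int) («length» i : Int) : List Int :=
  pvCum (fun j => PySem.List.pyGetD array j 0) 0 (PySem.List.pyRange i «length» 1)

-- A's inner loop emits exactly pvCum and counts it
theorem pv_innerA (f : Int → Int) :
    ∀ (L : List Int) (c : Int) (d : PySem.Dict Int Int),
      (L.foldl (fun (p : Int × PySem.Dict Int Int) j =>
          (p.1 + f j, p.2.modify (p.1 + f j) 0 (· + 1))) (c, d)).2
        = (pvCum f c L).foldl (fun d k => d.modify k 0 (· + 1)) d := by
  intro L
  induction L with
  | nil => intro c d; rfl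
  | cons j js ih => intro c d; simp [pvCum, List.foldl, ih]

-- shifting the running sum is a map over the zero-based cumulative list
theorem pv_cum_shift (f : Int → Int) :
    ∀ (L : List Int) (c : Int), pvCum f c L = (pvCum f 0 L).map (fun s => c + s) := by
  intro L
  induction L with
  | nil => intro c; rfl
  | cons j js ih =>
    intro c
    simp only [pvCum, List.map_cons, zero_add]
    congr 1
    rw [ih (c + f j), ih (f j), List.map_map]
    apply List.map_congr_left
    intro s _
    simp only [Function.comp_apply]
    ring

-- B's row recurrence: the row at i is array[i] consed onto (array[i] + ·) of the row at i+1
theorem pv_row_step (array : List Int) («length» i : Int) (h : i < «length») :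
    pvRow array «length» i
      = PySem.List.pyGetD array i 0
        :: (pvRow array «length» (i + 1)).map (fun s => PySem.List.pyGetD array i 0 + s) := by
  rw [pvRow, PySem.List.pyRange_one_cons h, pvCum]
  rw [pv_cum_shift, pvRow]
  simp

-- B's first loop produces exactly the rows [pvRow k … pvRow (length-1)] (appended back-to-front)
theorem pv_rows_eq (array : List Int) («length» : Int) :
    ∀ (m : Nat) (k : Int), «length» - k = (m : Int) →
      (PySem.List.pyRange k «length» 1).reverse.foldl
        (fun (p : List (List Int) × List Int) i =>
          let x := PySem.List.pyGetD array i 0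
          let row := x :: p.2.map (fun s => x + s)
          (p.1 ++ [row], row))
        ([], [])
      = (((PySem.List.pyRange k «length» 1).map (pvRow array «length»)).reverse,
         pvRow array «length» k) := by
  intro m
  induction m with
  | zero =>
    intro k hk
    rw [PySem.List.pyRange_one_eq_nil (by omega)]
    simp only [List.reverse_nil, List.foldl_nil, List.map_nil]
    rw [pvRow, PySem.List.pyRange_one_eq_nil (by omega)]
    rfl
  | succ p ih =>
    intro k hk
    have hlt : k < «length» := by omega
    rw [PySem.List.pyRange_one_cons hlt]
    simp only [List.reverse_cons, List.foldl_append, List.foldl_cons, List.foldl_nil,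
      List.map_cons, List.reverse_cons]
    rw [ih (k + 1) (by omega)]
    simp only
    rw [← pv_row_step array «length» k hlt]

-- ===== VERDICT (by name: the statement is the Claim_ definition above) =====
theorem get_prefix_sum_spec : Claim_equal_get_prefix_sum := by
  intro «length» array _ _
  unfold Spec_get_prefix_sum
  by_cases hneg : «length» ≤ 0
  · simp [get_prefix_sum, get_prefix_sum_alt, PySem.List.pyRange_one_eq_nil hneg]
  · simp only [get_prefix_sum, get_prefix_sum_alt]
    rw [pv_rows_eq array «length» «length».toNat 0 (by omega)]
    simp only [List.reverse_reverse, List.foldl_map]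
    congr 1
    apply PySem.List.foldl_congr_mem
    intro d i _
    rw [pv_innerA (fun j => PySem.List.pyGetD array j 0) (PySem.List.pyRange i «length» 1) 0 d]
    rfl
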